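-- pv_equiv track=rewrite | github.com/MKagesawa/Reliable-Messaging | Matrix.py | alnum2matrix
-- ===== SOURCE A (Python) =====
-- def alnum2matrix(msg):     #返回结果为matrix list
--     matrix = []
--     message = []
--     for c in msg:
--         message.append(ord(c))
--
--     if len(msg)%4 == 0:            #handle the len_row exactly
--         len_row = (len(message)//4)
--     else:
--         len_row = (len(message)//4 + 1)
--
--     [matrix.append([]) for i in range(len_row)]
--
--
--     for i in range(len_row):
--         for a in range(4):
--             try:
--                 matrix[i].append(message.pop(0))
--             except IndexError:
--                 matrix[i].append(0)
--
--
--     matrix_checksum = matrix[:]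
--     for i in range(len_row):
--         row_total = 0
--         for ele in matrix_checksum[i]:
--             row_total += ele
--         matrix_checksum[i].append(row_total)
--
--     matrix_checksum.append([])   #add column_sum
--     for i in range(5):
--         colum_total = 0
--         for a in range(len_row):
--             colum_total += matrix_checksum[a][i]
--         matrix_checksum[-1].append(colum_total)
--
--     return matrix_checksum
-- ===== SOURCE B (Python) =====
-- def alnum2matrix(msg):
--     # Single flat pass over the zero-padded char codes: grow the current row,
--     # accumulate the five column totals on the fly, flush a row every 4 codes.
--     codes = [ord(c) for c in msg]
--     codes = codes + [0] * ((4 - len(codes) % 4) % 4)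
--     rows = []
--     cur = []
--     cols = [0, 0, 0, 0, 0]
--     for v in codes:
--         cols[len(cur)] += v
--         cols[4] += v
--         cur.append(v)
--         if len(cur) == 4:
--             rows.append(cur + [sum(cur)])
--             cur = []
--     rows.append(cols)
--     return rows
-- ===== Notes on version B (the rewrite author's own statement) =====
-- stated objective: faster
-- what changed: Replaces A's four passes (build rows by popping message.pop(0) under try/except, shallow-copy, re-scan each row for its sum, then a nested index loop over the matrix for column sums) by a single flat pass over the zero-padded code list that grows the current row and accumulates the five column totals on the fly.
import Mathlib
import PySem

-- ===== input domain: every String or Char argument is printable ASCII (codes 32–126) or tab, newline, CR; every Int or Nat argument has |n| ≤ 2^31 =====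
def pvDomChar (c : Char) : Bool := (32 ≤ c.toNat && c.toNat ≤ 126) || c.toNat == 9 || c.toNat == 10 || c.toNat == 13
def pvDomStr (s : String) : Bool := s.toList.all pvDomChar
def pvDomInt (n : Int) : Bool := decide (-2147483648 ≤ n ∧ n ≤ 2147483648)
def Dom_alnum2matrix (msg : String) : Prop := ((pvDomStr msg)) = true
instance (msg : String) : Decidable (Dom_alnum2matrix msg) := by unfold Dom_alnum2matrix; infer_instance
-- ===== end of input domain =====

-- B replaces A's multi-pass, pop(0)-based construction by a single pass over the
-- zero-padded code list in 4-chunks accumulating the column totals as it goes.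


-- ===== PORT A =====
-- one row: 'for a in range(4): try append(message.pop(0)) except IndexError append(0)';
-- state is (row built so far, remaining message)
def pvArow (m : List Int) : List Int × List Int :=
  (List.range 4).foldl
    (fun (st : List Int × List Int) _ =>
      match st.2 with
      | [] => (st.1 ++ [0], [])
      | x :: xs => (st.1 ++ [x], xs))
    ([], m)

-- 'for i in range(len_row): …' building the matrix while message shrinks
def pvArows : Nat → List Int → List (List Int)
  | 0, _ => []
  | n + 1, m => (pvArow m).1 :: pvArows n (pvArow m).2

def alnum2matrix (msg : String) : List (List Int) :=
  let message : List Int := msg.toList.map (fun c => (c.toNat : Int))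
  let len_row : Nat :=
    if message.length % 4 == 0 then message.length / 4 else message.length / 4 + 1
  let matrix := pvArows len_row message
  -- row_total loop then 'matrix_checksum[i].append(row_total)' (rows shared with matrix[:])
  let matrix_checksum := matrix.map (fun r => r ++ [r.foldl (· + ·) 0])
  -- 'for i in range(5): colum_total over a in range(len_row) of matrix_checksum[a][i]'
  let colrow :=
    (PySem.List.pyRange 0 5 1).foldl
      (fun acc i =>
        acc ++ [(PySem.List.pyRange 0 (len_row : Int) 1).foldl
          (fun t a => t + PySem.List.pyGetD (PySem.List.pyGetD matrix_checksum a []) i 0) 0])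
      []
  matrix_checksum ++ [colrow]

-- ===== PORT B =====
-- the body of Source B's for loop; state = (rows, cur, cols); cols[k] for the in-range
-- indices len(cur) and 4 is List.getD/List.set (exact here: index always valid)
def pvBstep (st : List (List Int) × List Int × List Int) (v : Int) :
    List (List Int) × List Int × List Int :=
  let cols1 := st.2.2.set st.2.1.length (st.2.2.getD st.2.1.length 0 + v)
  let cols2 := cols1.set 4 (cols1.getD 4 0 + v)
  let cur1 := st.2.1 ++ [v]
  if cur1.length == 4 then
    (st.1 ++ [cur1 ++ [cur1.foldl (· + ·) 0]], [], cols2)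
  else
    (st.1, cur1, cols2)

def alnum2matrix_alt (msg : String) : List (List Int) :=
  let codes : List Int := msg.toList.map (fun c => (c.toNat : Int))
  let padded := codes ++ List.replicate ((4 - codes.length % 4) % 4) 0
  let st := padded.foldl pvBstep ([], [], [0, 0, 0, 0, 0])
  st.1 ++ [st.2.2]

-- ===== PRECONDITION & SPEC =====
def Spec_alnum2matrix (msg : String) (out : List (List Int)) : Prop := out = alnum2matrix_alt msg
instance (msg : String) (out : List (List Int)) : Decidable (Spec_alnum2matrix msg out) := by unfold Spec_alnum2matrix; infer_instance

-- ===== CLAIM (what is proved, stated in full; the proofs are below) =====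
def Claim_equal_alnum2matrix : Prop := ∀ (msg : String), Dom_alnum2matrix msg → Spec_alnum2matrix msg (alnum2matrix msg)

-- ===== LEMMAS AND PROOFS =====

-- canonical chunk forms used to relate the two ports
def pvChunks : List Int → List (List Int)
  | a :: b :: c :: d :: t => [a, b, c, d, a + b + c + d] :: pvChunks t
  | _ => []

def pvTot : List Int → Int × Int × Int × Int × Int
  | a :: b :: c :: d :: t =>
    let p := pvTot t
    (a + p.1, b + p.2.1, c + p.2.2.1, d + p.2.2.2.1, (a + b + c + d) + p.2.2.2.2)
  | _ => (0, 0, 0, 0, 0)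

theorem pvBstep_0 (rows : List (List Int)) (c0 c1 c2 c3 c4 v : Int) :
    pvBstep (rows, [], [c0, c1, c2, c3, c4]) v = (rows, [v], [c0 + v, c1, c2, c3, c4 + v]) := rfl

theorem pvBstep_1 (rows : List (List Int)) (x c0 c1 c2 c3 c4 v : Int) :
    pvBstep (rows, [x], [c0, c1, c2, c3, c4]) v = (rows, [x, v], [c0, c1 + v, c2, c3, c4 + v]) := rfl

theorem pvBstep_2 (rows : List (List Int)) (x y c0 c1 c2 c3 c4 v : Int) :
    pvBstep (rows, [x, y], [c0, c1, c2, c3, c4]) v =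
      (rows, [x, y, v], [c0, c1, c2 + v, c3, c4 + v]) := rfl

theorem pvBstep_3 (rows : List (List Int)) (x y z c0 c1 c2 c3 c4 v : Int) :
    pvBstep (rows, [x, y, z], [c0, c1, c2, c3, c4]) v =
      (rows ++ [[x, y, z, v, 0 + x + y + z + v]], [], [c0, c1, c2, c3 + v, c4 + v]) := rfl

theorem pvBfold_eq (cs : List Int) : 4 ∣ cs.length →
    ∀ (rows : List (List Int)) (c0 c1 c2 c3 c4 : Int),
    cs.foldl pvBstep (rows, [], [c0, c1, c2, c3, c4]) =
      (rows ++ pvChunks cs, [],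
        [c0 + (pvTot cs).1, c1 + (pvTot cs).2.1, c2 + (pvTot cs).2.2.1,
         c3 + (pvTot cs).2.2.2.1, c4 + (pvTot cs).2.2.2.2]) := by
  induction cs using pvChunks.induct with
  | case1 a b c d t ih =>
    intro hdvd rows c0 c1 c2 c3 c4
    have hdvd' : 4 ∣ t.length := by
      simp only [List.length_cons] at hdvd; omega
    rw [List.foldl_cons, pvBstep_0, List.foldl_cons, pvBstep_1, List.foldl_cons, pvBstep_2,
      List.foldl_cons, pvBstep_3, ih hdvd']
    simp only [pvChunks, pvTot, Prod.mk.injEq, List.append_assoc, List.cons_append,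
      List.nil_append, List.append_cancel_left_eq, List.cons.injEq, and_true, true_and]
    and_intros <;> first | rfl | ring
  | case2 t h =>
    intro hdvd rows c0 c1 c2 c3 c4
    rcases t with _ | ⟨a, _ | ⟨b, _ | ⟨c, _ | ⟨d, t⟩⟩⟩⟩
    · simp [pvChunks, pvTot]
    · simp only [List.length_cons, List.length_nil] at hdvd; omega
    · simp only [List.length_cons, List.length_nil] at hdvd; omega
    · simp only [List.length_cons, List.length_nil] at hdvd; omega
    · exact (h a b c d t rfl).elim

theorem pvArow_cons (a b c d : Int) (t : List Int) :
    pvArow (a :: b :: c :: d :: t) = ([a, b, c, d], t) := by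
  simp [pvArow, show List.range 4 = [0, 1, 2, 3] from rfl]

theorem pvArows_eq (n : Nat) : ∀ m : List Int, m.length ≤ 4 * n → 4 * n < m.length + 4 →
    (pvArows n m).map (fun r => r ++ [r.foldl (· + ·) 0]) =
      pvChunks (m ++ List.replicate (4 * n - m.length) 0) := by
  induction n with
  | zero =>
    intro m h1 _
    have : m = [] := List.eq_nil_of_length_eq_zero (by omega)
    subst this
    simp [pvArows, pvChunks]
  | succ k ih =>
    intro m h1 h2
    rcases m with _ | ⟨a, _ | ⟨b, _ | ⟨c, _ | ⟨d, t⟩⟩⟩⟩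
    · have hk : k = 0 := by simp only [List.length_nil] at h2; omega
      subst hk
      simp [pvArows, pvArow, pvChunks, show List.range 4 = [0, 1, 2, 3] from rfl]
      try ring
    · have hk : k = 0 := by simp only [List.length_cons, List.length_nil] at h2; omega
      subst hk
      simp [pvArows, pvArow, pvChunks, show List.range 4 = [0, 1, 2, 3] from rfl]
      try ring
    · have hk : k = 0 := by simp only [List.length_cons, List.length_nil] at h2; omega
      subst hk
      simp [pvArows, pvArow, pvChunks, show List.range 4 = [0, 1, 2, 3] from rfl]
      try ring
    · have hk : k = 0 := by simp only [List.length_cons, List.length_nil] at h2; omega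
      subst hk
      simp [pvArows, pvArow, pvChunks, show List.range 4 = [0, 1, 2, 3] from rfl]
      try ring
    · simp only [List.length_cons] at h1 h2
      have hrep : 4 * (k + 1) - (t.length + 1 + 1 + 1 + 1) = 4 * k - t.length := by omega
      simp only [pvArows, pvArow_cons, List.map_cons, List.cons_append, pvChunks,
        List.length_cons, hrep]
      refine List.cons_eq_cons.mpr ⟨?_, ih t (by omega) (by omega)⟩
      simp [List.foldl]
      try ring

theorem pvArows_length (n : Nat) (m : List Int) : (pvArows n m).length = n := by
  induction n generalizing m with
  | zero => rfl
  | succ k ih => simp [pvArows, ih]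

theorem pvChunks_colsum (cs : List Int) : ∀ t0 t1 t2 t3 t4 : Int,
    (pvChunks cs).foldl (fun t r => t + PySem.List.pyGetD r 0 0) t0 = t0 + (pvTot cs).1 ∧
    (pvChunks cs).foldl (fun t r => t + PySem.List.pyGetD r 1 0) t1 = t1 + (pvTot cs).2.1 ∧
    (pvChunks cs).foldl (fun t r => t + PySem.List.pyGetD r 2 0) t2 = t2 + (pvTot cs).2.2.1 ∧
    (pvChunks cs).foldl (fun t r => t + PySem.List.pyGetD r 3 0) t3 = t3 + (pvTot cs).2.2.2.1 ∧
    (pvChunks cs).foldl (fun t r => t + PySem.List.pyGetD r 4 0) t4 = t4 + (pvTot cs).2.2.2.2 := by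
  induction cs using pvChunks.induct with
  | case1 a b c d t ih =>
    intro t0 t1 t2 t3 t4
    simp only [pvChunks, pvTot, List.foldl_cons]
    obtain ⟨h0, h1, h2, h3, h4⟩ := ih (t0 + PySem.List.pyGetD [a, b, c, d, a + b + c + d] 0 0)
      (t1 + PySem.List.pyGetD [a, b, c, d, a + b + c + d] 1 0)
      (t2 + PySem.List.pyGetD [a, b, c, d, a + b + c + d] 2 0)
      (t3 + PySem.List.pyGetD [a, b, c, d, a + b + c + d] 3 0)
      (t4 + PySem.List.pyGetD [a, b, c, d, a + b + c + d] 4 0)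
    refine ⟨h0.trans ?_, h1.trans ?_, h2.trans ?_, h3.trans ?_, h4.trans ?_⟩ <;>
      simp [PySem.List.pyGetD] <;> ring
  | case2 t h =>
    intro t0 t1 t2 t3 t4
    rcases t with _ | ⟨a, _ | ⟨b, _ | ⟨c, _ | ⟨d, t⟩⟩⟩⟩
    · simp [pvChunks, pvTot]
    · simp [pvChunks, pvTot]
    · simp [pvChunks, pvTot]
    · simp [pvChunks, pvTot]
    · exact (h a b c d t rfl).elim

-- ===== VERDICT (by name: the statement is the Claim_ definition above) =====
theorem alnum2matrix_spec : Claim_equal_alnum2matrix := by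
  intro msg _
  unfold Spec_alnum2matrix alnum2matrix alnum2matrix_alt
  dsimp only
  set m : List Int := msg.toList.map (fun c => (c.toNat : Int)) with hm
  set n : Nat := if m.length % 4 == 0 then m.length / 4 else m.length / 4 + 1 with hn
  have hb1 : m.length ≤ 4 * n := by
    rw [hn]; split
    · rename_i h; simp at h; omega
    · rename_i h; simp at h; omega
  have hb2 : 4 * n < m.length + 4 := by
    rw [hn]; split
    · rename_i h; simp at h; omega
    · rename_i h; simp at h; omega
  have hpad : (4 - m.length % 4) % 4 = 4 * n - m.length := by
    rw [hn]; split
    · rename_i h; simp at h; omega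
    · rename_i h; simp at h; omega
  have hrows := pvArows_eq n m hb1 hb2
  rw [hpad]
  set padded := m ++ List.replicate (4 * n - m.length) 0 with hpadded
  have hdvd : 4 ∣ padded.length := by
    rw [hpadded]
    simp only [List.length_append, List.length_replicate]
    omega
  rw [hrows, pvBfold_eq padded hdvd [] 0 0 0 0 0]
  simp only []
  refine congrArg _ ?_
  refine congrArg (fun x => [x]) ?_
  have hlen : (n : Int) = ((pvChunks padded).length : Int) := by
    have h1 : ((pvArows n m).map (fun r => r ++ [r.foldl (· + ·) 0])).length = n := by
      simp [pvArows_length]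
    rw [← hrows, h1]
  rw [hlen]
  rw [show PySem.List.pyRange 0 5 1 = [0, 1, 2, 3, 4] from by decide]
  simp only [List.foldl_cons, List.foldl_nil, List.nil_append, List.cons_append]
  obtain ⟨h0, h1, h2, h3, h4⟩ := pvChunks_colsum padded 0 0 0 0 0
  rw [PySem.List.foldl_pyRange_zero_pyGetD' (pvChunks padded) []
        (fun t r => t + PySem.List.pyGetD r 0 0) 0,
      PySem.List.foldl_pyRange_zero_pyGetD' (pvChunks padded) []
        (fun t r => t + PySem.List.pyGetD r 1 0) 0,
      PySem.List.foldl_pyRange_zero_pyGetD' (pvChunks padded) []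
        (fun t r => t + PySem.List.pyGetD r 2 0) 0,
      PySem.List.foldl_pyRange_zero_pyGetD' (pvChunks padded) []
        (fun t r => t + PySem.List.pyGetD r 3 0) 0,
      PySem.List.foldl_pyRange_zero_pyGetD' (pvChunks padded) []
        (fun t r => t + PySem.List.pyGetD r 4 0) 0]
  rw [h0, h1, h2, h3, h4]
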